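-- pv_equiv track=rewrite | github.com/MrBrantCode/unitest_baseline | mut_generate/mist_train_cf/cf_86053/solution.py | odd_sum_prime_index_elements
-- ===== SOURCE A (Python) =====
-- def odd_sum_prime_index_elements(x):
--     def is_prime(n):
--         """Check if n is a prime number."""
--         if n == 0 or n == 1:
--             return False
--         for x in range(2, int(n**0.5) + 1):
--             if n % x == 0:
--                 return False
--         return True
--
--     output_list = set()
--     for index, value in enumerate(x):
--         if is_prime(index):
--             if value % 2 == 1:
--                 output_list.add(value)
--     return sorted(output_list)
-- ===== SOURCE B (Python) =====
-- def odd_sum_prime_index_elements(x):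
--     n = len(x)
--     comp = [False] * n
--     for i in range(2, n):
--         for j in range(i * i, n, i):
--             comp[j] = True
--     out = set()
--     for i, v in enumerate(x):
--         if i >= 2 and not comp[i] and v % 2 == 1:
--             out.add(v)
--     return sorted(out)
-- ===== Notes on version B (the rewrite author's own statement) =====
-- stated objective: faster
-- what changed: Replaces per-index trial-division primality testing with one sieve pass that marks composite indices by striking multiples, then a single collection pass.
import Mathlib
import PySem

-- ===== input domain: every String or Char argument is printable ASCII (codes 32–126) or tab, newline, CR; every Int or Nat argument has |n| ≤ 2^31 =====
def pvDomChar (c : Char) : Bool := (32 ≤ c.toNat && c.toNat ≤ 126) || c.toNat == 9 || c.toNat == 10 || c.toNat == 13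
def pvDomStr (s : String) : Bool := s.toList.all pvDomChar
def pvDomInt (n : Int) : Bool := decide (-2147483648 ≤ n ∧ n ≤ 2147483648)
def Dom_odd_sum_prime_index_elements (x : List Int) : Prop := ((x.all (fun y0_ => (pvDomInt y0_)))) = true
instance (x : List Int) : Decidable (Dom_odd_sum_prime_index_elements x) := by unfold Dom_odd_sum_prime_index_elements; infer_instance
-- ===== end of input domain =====

-- B replaces A's per-index trial-division primality test with a sieve that strikes
-- multiples once over the index range, then collects in a single pass (measured faster).

-- ===== PORT A =====
-- is_prime: trial division up to int(n**0.5) (n is a list index, hence nonnegative;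
-- int(n**0.5) is ported exactly as Nat.sqrt on that domain)
def pvIsPrime (n : Int) : Bool :=
  if n == 0 || n == 1 then false
  else (PySem.List.pyRange 2 ((Nat.sqrt n.toNat : Int) + 1) 1).all
        (fun d => !(PySem.Int.mod n d == 0))

def odd_sum_prime_index_elements (x : List Int) : List Int :=
  PySem.List.sorted
    ((PySem.List.enumerate x 0).foldl
      (fun (s : PySem.Set Int) iv =>
        if pvIsPrime iv.1 then
          if PySem.Int.mod iv.2 2 == 1 then PySem.Set.add s iv.2 else s
        else s)
      PySem.Set.empty)
    (fun v => v) false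

-- ===== PORT B =====
def pvSieve (n : Int) : List Bool :=
  (PySem.List.pyRange 2 n 1).foldl
    (fun c i =>
      (PySem.List.pyRange (i * i) n i).foldl
        (fun c j => PySem.List.pySetD c j true) c)
    (List.replicate n.toNat false)

def odd_sum_prime_index_elements_alt (x : List Int) : List Int :=
  let comp := pvSieve (x.length : Int)
  PySem.List.sorted
    ((PySem.List.enumerate x 0).foldl
      (fun (s : PySem.Set Int) iv =>
        if decide (2 ≤ iv.1) && !(PySem.List.pyGetD comp iv.1 false)
            && (PySem.Int.mod iv.2 2 == 1) then PySem.Set.add s iv.2 else s)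
      PySem.Set.empty)
    (fun v => v) false

-- ===== PRECONDITION & SPEC =====
def Spec_odd_sum_prime_index_elements (x : List Int) (out : List Int) : Prop := out = odd_sum_prime_index_elements_alt x
instance (x : List Int) (out : List Int) : Decidable (Spec_odd_sum_prime_index_elements x out) := by unfold Spec_odd_sum_prime_index_elements; infer_instance

-- ===== CLAIM (what is proved, stated in full; the proofs are below) =====
def Claim_equal_odd_sum_prime_index_elements : Prop := ∀ (x : List Int), Dom_odd_sum_prime_index_elements x → Spec_odd_sum_prime_index_elements x (odd_sum_prime_index_elements x)

-- ===== LEMMAS AND PROOFS =====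

-- marking fold: striking a list of in-range nonnegative positions sets exactly those cells
theorem pvMark_getD (L : List Int) (c : List Bool) (k : Nat)
    (hL : ∀ j ∈ L, 0 ≤ j ∧ j < (c.length : Int)) :
    (L.foldl (fun c j => PySem.List.pySetD c j true) c).getD k false
      = (c.getD k false || L.any (fun j => j == (k : Int))) := by
  induction L generalizing c with
  | nil => simp
  | cons j L ih =>
    obtain ⟨hj, hjlt⟩ := hL j (by simp)
    simp only [List.foldl_cons, List.any_cons]
    rw [ih _ (by
        intro a ha
        have := hL a (by simp [ha])
        simpa [PySem.List.length_pySetD] using this),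
      PySem.List.pySetD_of_nonneg _ _ hj]
    by_cases hjk : j = (k : Int)
    · subst hjk
      have hlen : k < c.length := by omega
      simp [List.getD, hlen, Int.toNat_natCast]
    · have hne : j.toNat ≠ k := by omega
      have hb : (j == (k : Int)) = false := by simp [hjk]
      simp [List.getD, hne, hb]

theorem pvMark_length (L : List Int) (c : List Bool) :
    (L.foldl (fun c j => PySem.List.pySetD c j true) c).length = c.length := by
  induction L generalizing c with
  | nil => rfl
  | cons j L ih => simp [ih, PySem.List.length_pySetD]

-- the outer sieve fold: cell k ends true iff some i in M strikes it
theorem pvSieveFold_getD (M : List Int) (n : Int) (c : List Bool) (k : Nat)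
    (hM : ∀ i ∈ M, 2 ≤ i) (hkn : (k : Int) < n) (hcl : n ≤ (c.length : Int)) :
    ((M.foldl (fun c i =>
        (PySem.List.pyRange (i * i) n i).foldl
          (fun c j => PySem.List.pySetD c j true) c) c).getD k false)
      = (c.getD k false ||
          M.any (fun i => decide (i * i ≤ (k : Int) ∧ i ∣ (k : Int)))) := by
  induction M generalizing c with
  | nil => simp
  | cons i M ih =>
    have hi : 2 ≤ i := hM i (by simp)
    have hstep : (0:Int) < i := by omega
    simp only [List.foldl_cons, List.any_cons]
    rw [ih _ (fun i hi => hM i (by simp [hi]))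
        (by rw [pvMark_length]; exact hcl)]
    rw [pvMark_getD _ _ _ (by
      intro j hj
      rcases (PySem.List.mem_pyRange_iff_of_pos hstep j).1 hj with ⟨h1, h2, _⟩
      constructor
      · nlinarith
      · omega)]
    have hx : ((PySem.List.pyRange (i * i) n i).any (fun j => j == (k : Int)))
        = decide (i * i ≤ (k : Int) ∧ i ∣ (k : Int)) := by
      rw [Bool.eq_iff_iff, List.any_eq_true, decide_eq_true_eq]
      constructor
      · rintro ⟨j, hj, hb⟩
        rw [beq_iff_eq] at hb; subst hb
        rcases (PySem.List.mem_pyRange_iff_of_pos hstep _).1 hj with ⟨h1, _, h3⟩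
        refine ⟨h1, ?_⟩
        have := dvd_add h3 (Dvd.intro i rfl)
        simpa using this
      · rintro ⟨h1, h2⟩
        exact ⟨(k : Int), (PySem.List.mem_pyRange_iff_of_pos hstep _).2
          ⟨h1, hkn, dvd_sub h2 (Dvd.intro i rfl)⟩, by simp⟩
    rw [hx, Bool.or_assoc]

theorem pvSieve_getD (n : Int) (k : Nat) (hkn : (k : Int) < n) :
    ((pvSieve n).getD k false = true)
      ↔ ∃ i : Int, 2 ≤ i ∧ i * i ≤ (k : Int) ∧ i ∣ (k : Int) := by
  unfold pvSieve
  rw [pvSieveFold_getD _ n _ k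
      (fun i hi => ((PySem.List.mem_pyRange_one).1 hi).1) hkn (by simp)]
  have hrep : (List.replicate n.toNat false).getD k false = false := by
    simp [List.getD, List.getElem?_replicate]
    split <;> simp
  rw [hrep, Bool.false_or, List.any_eq_true]
  constructor
  · rintro ⟨i, hi, hd⟩
    rw [decide_eq_true_eq] at hd
    exact ⟨i, ((PySem.List.mem_pyRange_one).1 hi).1, hd⟩
  · rintro ⟨i, h2le, h1, h2⟩
    refine ⟨i, (PySem.List.mem_pyRange_one).2 ⟨h2le, by nlinarith⟩, ?_⟩
    rw [decide_eq_true_eq]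
    exact ⟨h1, h2⟩

-- trial division agrees with "no divisor d with 2 ≤ d and d*d ≤ k"
theorem pvIsPrime_iff (k : Nat) :
    pvIsPrime (k : Int) = true
      ↔ (2 ≤ (k : Int) ∧ ¬ ∃ i : Int, 2 ≤ i ∧ i * i ≤ (k : Int) ∧ i ∣ (k : Int)) := by
  match k with
  | 0 => simp [pvIsPrime]
  | 1 => simp [pvIsPrime]
  | (m+2) =>
    set K : Nat := m + 2 with hK
    have hk2 : (2:Int) ≤ (K : Int) := by omega
    have h0 : ¬((K : Int) == 0 || (K : Int) == 1) = true := by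
      simp only [Bool.or_eq_true, beq_iff_eq]
      omega
    unfold pvIsPrime
    rw [if_neg h0]
    simp only [Int.toNat_natCast]
    simp only [List.all_eq_true, hk2, true_and]
    constructor
    · intro h ⟨i, hi2, hsq, hdvd⟩
      have hmem : i ∈ PySem.List.pyRange 2 ((Nat.sqrt K : Int) + 1) 1 := by
        rw [PySem.List.mem_pyRange_one]
        refine ⟨hi2, ?_⟩
        have hle : i.toNat ≤ Nat.sqrt K := by
          rw [Nat.le_sqrt]
          have hti : (i.toNat : Int) = i := by omega
          nlinarith [hti]
        omega
      have := h i hmem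
      simp only [Bool.not_eq_eq_eq_not, Bool.not_true, beq_eq_false_iff_ne] at this
      exact this ((PySem.Int.mod_eq_zero_iff_dvd _ _).2 hdvd)
    · intro h d hd
      rw [PySem.List.mem_pyRange_one] at hd
      simp only [Bool.not_eq_eq_eq_not, Bool.not_true, beq_eq_false_iff_ne]
      intro hmod
      have hdvd := (PySem.Int.mod_eq_zero_iff_dvd _ _).1 hmod
      apply h
      refine ⟨d, hd.1, ?_, hdvd⟩
      have hds : d.toNat ≤ Nat.sqrt K := by omega
      have h2 := Nat.le_sqrt.1 hds
      have hdt : (d.toNat : Int) = d := by omega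
      nlinarith [h2, hdt]

-- ===== VERDICT (by name: the statement is the Claim_ definition above) =====
theorem odd_sum_prime_index_elements_spec : Claim_equal_odd_sum_prime_index_elements := by
  intro x _
  unfold Spec_odd_sum_prime_index_elements odd_sum_prime_index_elements
    odd_sum_prime_index_elements_alt
  congr 1
  apply PySem.List.foldl_congr_mem
  intro acc iv hiv
  rcases (PySem.List.mem_enumerate_iff x 0 iv).1 hiv with ⟨k, hk, rfl⟩
  simp only [zero_add]
  have hkn : (k : Int) < (x.length : Int) := by exact_mod_cast hk
  have hb : pvIsPrime (k : Int)
      = (decide (2 ≤ (k : Int))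
          && !(PySem.List.pyGetD (pvSieve (x.length : Int)) (k : Int) false)) := by
    rw [PySem.List.pyGetD_natCast]
    have h1 := pvIsPrime_iff k
    have h2 := pvSieve_getD (x.length : Int) k hkn
    rw [Bool.eq_iff_iff]
    simp only [Bool.and_eq_true, Bool.not_eq_true', decide_eq_true_eq]
    rw [h1]
    constructor
    · rintro ⟨hge, hno⟩
      refine ⟨hge, ?_⟩
      cases hCv : (pvSieve ((x.length : Nat) : Int)).getD k false
      · rfl
      · exact absurd (h2.1 hCv) hno
    · rintro ⟨hge, hfalse⟩
      exact ⟨hge, fun hex => by rw [h2.2 hex] at hfalse; cases hfalse⟩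
  rw [hb]
  cases h2 : decide (2 ≤ (k : Int)) <;>
    cases hC : PySem.List.pyGetD (pvSieve (x.length : Int)) (k : Int) false <;> simp
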